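-- pv_equiv track=rewrite | github.com/Halimabeeh/Elevvo | task1-student-performance/student_performance_analysis.py | get_feature_combo_groups
-- ===== SOURCE A (Python) =====
-- def normalize_name(name: str) -> str:
--     return "".join(ch.lower() for ch in name if ch.isalnum())
--
-- def get_feature_combo_groups(columns: list[str]) -> dict[str, list[str]]:
--     """Build sensible feature-drop groups from available dataset columns."""
--     keyword_groups: dict[str, list[str]] = {
--         "Sleep": ["sleep"],
--         "Participation": ["participation"],
--         "Wellbeing": ["sleep", "physical"],
--         "Engagement": ["participation", "attendance", "extracurricular"],
--         "Home support": ["parental", "family", "internet"],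
--         "Academic support": ["tutoring", "teacher", "school"],
--     }
--
--     normalized_to_original = {normalize_name(col): col for col in columns}
--     groups: dict[str, list[str]] = {}
--     for group_name, keywords in keyword_groups.items():
--         matched = [
--             original
--             for normalized, original in normalized_to_original.items()
--             if any(keyword in normalized for keyword in keywords)
--         ]
--         if matched:
--             groups[group_name] = sorted(set(matched))
--     return groups
-- ===== SOURCE B (Python) =====
-- _KEYWORDS = [
--     "sleep", "participation", "physical", "attendance", "extracurricular",
--     "parental", "family", "internet", "tutoring", "teacher", "school",
-- ]
--
-- _GROUPS = [
--     ("Sleep", ["sleep"]),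
--     ("Participation", ["participation"]),
--     ("Wellbeing", ["sleep", "physical"]),
--     ("Engagement", ["participation", "attendance", "extracurricular"]),
--     ("Home support", ["parental", "family", "internet"]),
--     ("Academic support", ["tutoring", "teacher", "school"]),
-- ]
--
--
-- def normalize_name(name: str) -> str:
--     return "".join(ch.lower() for ch in name if ch.isalnum())
--
--
-- def get_feature_combo_groups(columns: list[str]) -> dict[str, list[str]]:
--     """Build sensible feature-drop groups from available dataset columns."""
--     normalized_to_original = {normalize_name(col): col for col in columns}
--     # Inverted index: each keyword -> set of original columns matching it.
--     postings = {
--         kw: {orig for norm, orig in normalized_to_original.items() if kw in norm}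
--         for kw in _KEYWORDS
--     }
--     # Each group is then a pure set union of posting lists: no substring
--     # tests happen during group construction.
--     groups = {}
--     for name, kws in _GROUPS:
--         members = set()
--         for kw in kws:
--             members |= postings[kw]
--         if members:
--             groups[name] = sorted(members)
--     return groups
-- ===== Notes on version B (the rewrite author's own statement) =====
-- stated objective: alternative
-- what changed: B builds an inverted index (keyword -> set of matching original columns) in one staged pass over the distinct keywords, and then forms each group as a pure set union of posting sets, so no substring tests occur during group construction; A instead rescans the whole normalized-to-original dict once per group with any() over that group's keywords.
import Mathlib
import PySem

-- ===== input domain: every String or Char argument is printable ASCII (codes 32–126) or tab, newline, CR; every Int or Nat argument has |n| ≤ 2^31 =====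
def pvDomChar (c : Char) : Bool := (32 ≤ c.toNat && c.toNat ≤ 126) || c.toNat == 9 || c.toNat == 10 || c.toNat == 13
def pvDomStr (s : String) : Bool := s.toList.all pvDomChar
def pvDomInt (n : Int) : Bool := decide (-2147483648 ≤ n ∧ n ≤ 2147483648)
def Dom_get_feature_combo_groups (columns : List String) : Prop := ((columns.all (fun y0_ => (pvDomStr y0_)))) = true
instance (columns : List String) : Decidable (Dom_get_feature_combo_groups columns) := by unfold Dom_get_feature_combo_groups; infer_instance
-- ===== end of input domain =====

-- B replaces A's per-group rescans of the column dict by an inverted index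
-- (keyword -> posting set of matching columns) built once; each group is then a
-- pure set union of posting sets, with no substring tests during group
-- construction ("alternative": same result, different data structure).

-- shared helper: both Pythons define the identical normalize_name
def normalize_name (name : String) : String :=
  String.mk ((name.toList.filter (fun ch => PySem.Chars.isalnum ch)).map PySem.Chars.lowerChar)

-- ===== PORT A =====
def get_feature_combo_groups (columns : List String) : List (String × List String) :=
  let keyword_groups : List (String × List String) :=
    [("Sleep", ["sleep"]),
     ("Participation", ["participation"]),
     ("Wellbeing", ["sleep", "physical"]),
     ("Engagement", ["participation", "attendance", "extracurricular"]),
     ("Home support", ["parental", "family", "internet"]),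
     ("Academic support", ["tutoring", "teacher", "school"])]
  let normalized_to_original : PySem.Dict String String :=
    columns.foldl (fun d col => d.insert (normalize_name col) col) PySem.Dict.empty
  let groups : PySem.Dict String (List String) :=
    keyword_groups.foldl (fun groups g =>
      let matched :=
        (normalized_to_original.items.filter
          (fun p => g.2.any (fun keyword => PySem.Str.isIn keyword p.1))).map (fun p => p.2)
      if matched ≠ [] then
        groups.insert g.1 (PySem.List.sorted (PySem.Set.ofList matched) (fun x => x) false)
      else groups) PySem.Dict.empty
  groups.items

-- ===== PORT B =====
def pvKEYWORDS : List String :=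
  ["sleep", "participation", "physical", "attendance", "extracurricular",
   "parental", "family", "internet", "tutoring", "teacher", "school"]

def pvGROUPS : List (String × List String) :=
  [("Sleep", ["sleep"]),
   ("Participation", ["participation"]),
   ("Wellbeing", ["sleep", "physical"]),
   ("Engagement", ["participation", "attendance", "extracurricular"]),
   ("Home support", ["parental", "family", "internet"]),
   ("Academic support", ["tutoring", "teacher", "school"])]

def get_feature_combo_groups_alt (columns : List String) : List (String × List String) :=
  let normalized_to_original : PySem.Dict String String :=
    columns.foldl (fun d col => d.insert (normalize_name col) col) PySem.Dict.empty
  -- inverted index: keyword -> set of originals whose normalized name contains it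
  let postings : PySem.Dict String (PySem.Set String) :=
    pvKEYWORDS.foldl (fun d kw =>
      d.insert kw (PySem.Set.ofList
        ((normalized_to_original.items.filter
          (fun p => PySem.Str.isIn kw p.1)).map (fun p => p.2)))) PySem.Dict.empty
  -- postings[kw]: every group keyword is a key of postings, so getD is exact here
  let groups : PySem.Dict String (List String) :=
    pvGROUPS.foldl (fun groups g =>
      let members : PySem.Set String :=
        g.2.foldl (fun s kw => PySem.Set.union s (postings.getD kw PySem.Set.empty))
          (PySem.Set.empty : PySem.Set String)
      if members.isEmpty then groups
      else groups.insert g.1 (PySem.List.sorted members (fun x => x) false))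
      PySem.Dict.empty
  groups.items

-- ===== PRECONDITION & SPEC =====
def Spec_get_feature_combo_groups (columns : List String) (out : List (String × List String)) : Prop := out = get_feature_combo_groups_alt columns
instance (columns : List String) (out : List (String × List String)) : Decidable (Spec_get_feature_combo_groups columns out) := by unfold Spec_get_feature_combo_groups; infer_instance

-- ===== CLAIM (what is proved, stated in full; the proofs are below) =====
def Claim_equal_get_feature_combo_groups : Prop := ∀ (columns : List String), Dom_get_feature_combo_groups columns → Spec_get_feature_combo_groups columns (get_feature_combo_groups columns)

-- ===== LEMMAS AND PROOFS =====

-- proof-side vocabulary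
def pvCond (g : String × List String) (norm : String) : Bool :=
  g.2.any (fun keyword => PySem.Str.isIn keyword norm)

def pvMatched (its : List (String × String)) (g : String × List String) : List String :=
  (its.filter (fun p => pvCond g p.1)).map (fun p => p.2)

def pvMk (its : List (String × String)) (kw : String) : List String :=
  (its.filter (fun p => PySem.Str.isIn kw p.1)).map (fun p => p.2)

def pvPostings (its : List (String × String)) : PySem.Dict String (PySem.Set String) :=
  pvKEYWORDS.foldl (fun d kw => d.insert kw (PySem.Set.ofList (pvMk its kw))) PySem.Dict.empty

def pvMembers (its : List (String × String)) (kws : List String) : PySem.Set String :=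
  kws.foldl (fun s kw => PySem.Set.union s ((pvPostings its).getD kw PySem.Set.empty))
    PySem.Set.empty

lemma pvPostings_items (its : List (String × String)) :
    (pvPostings its).items = pvKEYWORDS.map (fun kw => (kw, PySem.Set.ofList (pvMk its kw))) := by
  have h := PySem.Dict.items_foldl_insert_fresh pvKEYWORDS (fun kw => kw)
    (fun kw => PySem.Set.ofList (pvMk its kw)) PySem.Dict.empty
    (fun kw _ => PySem.Dict.contains_empty kw) (by decide)
  simpa [pvPostings] using h

lemma pvPostings_keys_nodup (its : List (String × String)) :
    (pvPostings its).keys.Nodup := by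
  have h : (pvPostings its).keys = pvKEYWORDS := by
    unfold PySem.Dict.keys
    rw [pvPostings_items, List.map_map]
    exact List.map_id' pvKEYWORDS
  rw [h]
  decide

lemma pvPostings_getD (its : List (String × String)) (kw : String) (h : kw ∈ pvKEYWORDS) :
    (pvPostings its).getD kw PySem.Set.empty = PySem.Set.ofList (pvMk its kw) := by
  refine PySem.Dict.getD_of_mem_items (pvPostings its) ?_ (pvPostings_keys_nodup its) _
  rw [pvPostings_items]
  exact List.mem_map_of_mem h

lemma pvMembers_mem (its : List (String × String)) (x : String) :
    ∀ (kws : List String) (s : PySem.Set String),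
      (x ∈ kws.foldl (fun s kw => PySem.Set.union s ((pvPostings its).getD kw PySem.Set.empty)) s)
        ↔ x ∈ s ∨ ∃ kw ∈ kws, x ∈ (pvPostings its).getD kw PySem.Set.empty := by
  intro kws
  induction kws with
  | nil => intro s; simp
  | cons kw kws ih =>
    intro s
    rw [List.foldl_cons, ih]
    simp [PySem.Set.mem_union, or_assoc]

lemma pvMembers_nodup (its : List (String × String)) :
    ∀ (kws : List String) (s : PySem.Set String), s.Nodup →
      (kws.foldl (fun s kw => PySem.Set.union s ((pvPostings its).getD kw PySem.Set.empty)) s).Nodup := by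
  intro kws
  induction kws with
  | nil => intro s h; exact h
  | cons kw kws ih =>
    intro s h
    rw [List.foldl_cons]
    exact ih _ (PySem.Set.nodup_union _ _ h)

lemma pvMembers_iff (its : List (String × String)) (g : String × List String)
    (hsub : ∀ kw ∈ g.2, kw ∈ pvKEYWORDS) (x : String) :
    x ∈ pvMembers its g.2 ↔ x ∈ PySem.Set.ofList (pvMatched its g) := by
  rw [pvMembers, pvMembers_mem, PySem.Set.mem_ofList]
  constructor
  · rintro (h | ⟨kw, hkw, hx⟩)
    · simp [PySem.Set.empty] at h
    · rw [pvPostings_getD its kw (hsub kw hkw), PySem.Set.mem_ofList] at hx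
      rcases List.mem_map.mp hx with ⟨p, hp, rfl⟩
      rcases List.mem_filter.mp hp with ⟨hpm, hin⟩
      refine List.mem_map.mpr ⟨p, List.mem_filter.mpr ⟨hpm, ?_⟩, rfl⟩
      simp only [pvCond, List.any_eq_true]
      exact ⟨kw, hkw, hin⟩
  · intro hx
    rcases List.mem_map.mp hx with ⟨p, hp, rfl⟩
    rcases List.mem_filter.mp hp with ⟨hpm, hc⟩
    rcases List.any_eq_true.mp (by simpa [pvCond] using hc) with ⟨kw, hkw, hin⟩
    refine Or.inr ⟨kw, hkw, ?_⟩
    rw [pvPostings_getD its kw (hsub kw hkw), PySem.Set.mem_ofList]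
    exact List.mem_map_of_mem (List.mem_filter.mpr ⟨hpm, hin⟩)

lemma pvMembers_perm (its : List (String × String)) (g : String × List String)
    (hsub : ∀ kw ∈ g.2, kw ∈ pvKEYWORDS) :
    (pvMembers its g.2).Perm (PySem.Set.ofList (pvMatched its g)) :=
  (List.perm_ext_iff_of_nodup (pvMembers_nodup its g.2 _ List.nodup_nil)
    (PySem.Set.nodup_ofList _)).mpr (pvMembers_iff its g hsub)

lemma pvSorted_eq (its : List (String × String)) (g : String × List String)
    (hsub : ∀ kw ∈ g.2, kw ∈ pvKEYWORDS) :
    PySem.List.sorted (pvMembers its g.2) (fun x => x) false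
      = PySem.List.sorted (PySem.Set.ofList (pvMatched its g)) (fun x => x) false :=
  PySem.List.sorted_eq_sorted_of_perm _ _ _ (fun _ _ h => h) (pvMembers_perm its g hsub)

lemma pvCond_eq (its : List (String × String)) (g : String × List String)
    (hsub : ∀ kw ∈ g.2, kw ∈ pvKEYWORDS) :
    (pvMembers its g.2 ≠ []) ↔ (pvMatched its g ≠ []) := by
  have hmem := pvMembers_iff its g hsub
  constructor
  · intro h hm
    rcases List.exists_mem_of_ne_nil _ h with ⟨x, hx⟩
    have h2 := (hmem x).mp hx
    rw [PySem.Set.mem_ofList, hm] at h2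
    simp at h2
  · intro h hm
    rcases List.exists_mem_of_ne_nil _ h with ⟨x, hx⟩
    have h2 : x ∈ pvMembers its g.2 := (hmem x).mpr ((PySem.Set.mem_ofList _ _).mpr hx)
    rw [hm] at h2
    simp at h2

-- generic "insert-if" fold over fresh distinct group names
lemma pvGroupFold (c : (String × List String) → Prop) [DecidablePred c]
    (v : (String × List String) → List String) :
    ∀ (L : List (String × List String)) (d : PySem.Dict String (List String)),
      (∀ g ∈ L, d.contains g.1 = false) → (L.map Prod.fst).Nodup →
      (L.foldl (fun groups g => if c g then groups.insert g.1 (v g) else groups) d).items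
        = d.items ++ (L.filter (fun g => decide (c g))).map (fun g => (g.1, v g)) := by
  intro L
  induction L with
  | nil => intro d _ _; simp
  | cons g L ih =>
    intro d hfresh hnd
    have hnd' : (g.1 :: L.map Prod.fst).Nodup := by simpa using hnd
    have hnotmem : g.1 ∉ L.map Prod.fst := (List.nodup_cons.mp hnd').1
    have hndL : (L.map Prod.fst).Nodup := (List.nodup_cons.mp hnd').2
    rw [List.foldl_cons, List.filter_cons]
    by_cases hm : c g
    · rw [if_pos hm]
      have hc : d.contains g.1 = false := hfresh g List.mem_cons_self
      have hfresh' : ∀ g' ∈ L, (d.insert g.1 (v g)).contains g'.1 = false := by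
        intro g' hg'
        have hne : g'.1 ≠ g.1 := by
          intro e
          exact hnotmem (e ▸ List.mem_map_of_mem hg')
        rw [PySem.Dict.contains_insert]
        simp [hne, hfresh g' (List.mem_cons_of_mem _ hg')]
      rw [ih _ hfresh' hndL, PySem.Dict.items_insert_of_not_contains _ _ hc]
      simp [hm, List.append_assoc]
    · rw [if_neg hm]
      rw [ih _ (fun g' h' => hfresh g' (List.mem_cons_of_mem _ h')) hndL]
      simp [hm]

-- same fold, Bool-guarded with the insert in the else-branch (B's shape)
lemma pvGroupFoldB (c : (String × List String) → Bool)
    (v : (String × List String) → List String) :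
    ∀ (L : List (String × List String)) (d : PySem.Dict String (List String)),
      (∀ g ∈ L, d.contains g.1 = false) → (L.map Prod.fst).Nodup →
      (L.foldl (fun groups g => if c g then groups else groups.insert g.1 (v g)) d).items
        = d.items ++ (L.filter (fun g => !c g)).map (fun g => (g.1, v g)) := by
  intro L
  induction L with
  | nil => intro d _ _; simp
  | cons g L ih =>
    intro d hfresh hnd
    have hnd' : (g.1 :: L.map Prod.fst).Nodup := by simpa using hnd
    have hnotmem : g.1 ∉ L.map Prod.fst := (List.nodup_cons.mp hnd').1
    have hndL : (L.map Prod.fst).Nodup := (List.nodup_cons.mp hnd').2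
    rw [List.foldl_cons, List.filter_cons]
    by_cases hm : c g = true
    · rw [if_pos hm]
      rw [ih _ (fun g' h' => hfresh g' (List.mem_cons_of_mem _ h')) hndL]
      simp [hm]
    · rw [if_neg hm]
      have hc : d.contains g.1 = false := hfresh g List.mem_cons_self
      have hfresh' : ∀ g' ∈ L, (d.insert g.1 (v g)).contains g'.1 = false := by
        intro g' hg'
        have hne : g'.1 ≠ g.1 := by
          intro e
          exact hnotmem (e ▸ List.mem_map_of_mem hg')
        rw [PySem.Dict.contains_insert]
        simp [hne, hfresh g' (List.mem_cons_of_mem _ hg')]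
      rw [ih _ hfresh' hndL, PySem.Dict.items_insert_of_not_contains _ _ hc]
      simp [Bool.not_eq_true _ ▸ hm, List.append_assoc]

lemma pvAitems (its : List (String × String)) :
    (pvGROUPS.foldl (fun groups g =>
        if pvMatched its g ≠ [] then
          groups.insert g.1 (PySem.List.sorted (PySem.Set.ofList (pvMatched its g)) (fun x => x) false)
        else groups) PySem.Dict.empty).items
    = PySem.Dict.empty.items ++ (pvGROUPS.filter (fun g => decide (pvMatched its g ≠ []))).map
        (fun g => (g.1, PySem.List.sorted (PySem.Set.ofList (pvMatched its g)) (fun x => x) false)) := by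
  rw [pvGroupFold (fun g => pvMatched its g ≠ []) _ pvGROUPS PySem.Dict.empty
      (fun g _ => PySem.Dict.contains_empty g.1) (by decide)]

lemma pvBitems (its : List (String × String)) :
    (pvGROUPS.foldl (fun groups g =>
        if (pvMembers its g.2).isEmpty then groups
        else groups.insert g.1 (PySem.List.sorted (pvMembers its g.2) (fun x => x) false))
        PySem.Dict.empty).items
    = PySem.Dict.empty.items ++ (pvGROUPS.filter (fun g => !(pvMembers its g.2).isEmpty)).map
        (fun g => (g.1, PySem.List.sorted (pvMembers its g.2) (fun x => x) false)) := by
  rw [pvGroupFoldB (fun g => (pvMembers its g.2).isEmpty) _ pvGROUPS PySem.Dict.empty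
      (fun g _ => PySem.Dict.contains_empty g.1) (by decide)]

lemma pvSubAll : ∀ g ∈ pvGROUPS, ∀ kw ∈ g.2, kw ∈ pvKEYWORDS := by decide

lemma pvMain (its : List (String × String)) :
    (pvGROUPS.foldl (fun groups g =>
        if pvMatched its g ≠ [] then
          groups.insert g.1 (PySem.List.sorted (PySem.Set.ofList (pvMatched its g)) (fun x => x) false)
        else groups) PySem.Dict.empty).items
    = (pvGROUPS.foldl (fun groups g =>
        if (pvMembers its g.2).isEmpty then groups
        else groups.insert g.1 (PySem.List.sorted (pvMembers its g.2) (fun x => x) false))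
        PySem.Dict.empty).items := by
  rw [pvAitems, pvBitems]
  have hfil : pvGROUPS.filter (fun g => decide (pvMatched its g ≠ []))
      = pvGROUPS.filter (fun g => !(pvMembers its g.2).isEmpty) := by
    refine List.filter_congr ?_
    intro g hg
    have hb : ∀ (l : List String), (!l.isEmpty) = decide (l ≠ []) := by
      intro l; cases l <;> simp
    rw [hb]
    simp only [decide_eq_decide]
    exact (pvCond_eq its g (pvSubAll g hg)).symm
  rw [hfil]
  refine congrArg (fun t => PySem.Dict.empty.items ++ t) (List.map_congr_left ?_)
  intro g hg
  have hgG : g ∈ pvGROUPS := List.mem_of_mem_filter hg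
  rw [pvSorted_eq its g (pvSubAll g hgG)]

-- ===== VERDICT (by name: the statement is the Claim_ definition above) =====
theorem get_feature_combo_groups_spec : Claim_equal_get_feature_combo_groups := by
  unfold Claim_equal_get_feature_combo_groups
  intro columns _
  unfold Spec_get_feature_combo_groups get_feature_combo_groups get_feature_combo_groups_alt
  exact pvMain ((columns.foldl (fun d col => d.insert (normalize_name col) col)
    PySem.Dict.empty).items)
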